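-- pv_equiv track=rewrite | github.com/comeputerwsy/frontend | QingJing-agent/devlop_home/data_process.py | sliding_window_5
-- ===== SOURCE A (Python) =====
-- def sliding_window_5(arr):
--     """滑动窗口大小为5的逻辑"""
--     window_size = 5
--     modified_arr = arr.copy()
--     for i in range(len(arr) - window_size + 1):
--         window = arr[i : i + window_size]
--         if (
--             window[1] < 10
--             and window[2] < 10
--             and window[3] < 10
--             and window[0] >= 10
--             and window[4] >= 10
--         ):
--             # 将 window[0] 包装成列表进行赋值
--             modified_arr[i + 1 : i + 4] = [window[0]] * 3
--     return modified_arr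
-- ===== SOURCE B (Python) =====
-- def sliding_window_5(arr):
--     """滑动窗口大小为5的逻辑"""
--     n = len(arr)
--
--     def value_at(j):
--         # j is replaced iff it lies inside the dip of a matching window
--         # starting at i = j - d for some d in 1..3; then its value is arr[i].
--         for d in (1, 2, 3):
--             i = j - d
--             if (
--                 i >= 0
--                 and i + 4 < n
--                 and arr[i] >= 10
--                 and arr[i + 4] >= 10
--                 and arr[i + 1] < 10
--                 and arr[i + 2] < 10
--                 and arr[i + 3] < 10
--             ):
--                 return arr[i]
--         return arr[j]
--
--     return [value_at(j) for j in range(n)]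
-- ===== Notes on version B (the rewrite author's own statement) =====
-- stated objective: alternative
-- what changed: B replaces A's in-place fold with slice reassignments by a pure per-index map: each output position independently decides whether it sits inside a matching dip (a high value, three lows, a high value) and takes the left high value, else its own value.
import Mathlib
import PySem

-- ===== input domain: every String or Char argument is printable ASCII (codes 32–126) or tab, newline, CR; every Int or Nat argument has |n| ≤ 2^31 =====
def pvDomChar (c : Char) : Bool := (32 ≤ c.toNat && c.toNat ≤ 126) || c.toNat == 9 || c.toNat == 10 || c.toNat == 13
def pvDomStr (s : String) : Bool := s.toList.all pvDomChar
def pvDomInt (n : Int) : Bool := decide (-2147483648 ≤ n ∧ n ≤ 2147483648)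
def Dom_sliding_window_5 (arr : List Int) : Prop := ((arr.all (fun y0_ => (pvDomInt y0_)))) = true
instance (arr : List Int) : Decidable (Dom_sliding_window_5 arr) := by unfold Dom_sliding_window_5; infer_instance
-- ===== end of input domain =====

-- B computes the same smoothing by a pure per-index map instead of A's fold with slice reassignment; same cost, no mutation.

-- ===== PORT A =====
-- window = arr[i:i+5]; for i in the loop 0 ≤ i ≤ len-5, so indices 0..4 of window and
-- the slice bounds i+1, i+4 are always in range: getD 0 / take / drop are exact here.
-- modified_arr[i+1:i+4] = [w0]*3 is the equal-length slice assignment take/replicate/drop.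
def pvStepA (arr : List Int) (m : List Int) (i : Nat) : List Int :=
  let window := (arr.drop i).take 5
  if window.getD 1 0 < 10 ∧ window.getD 2 0 < 10 ∧ window.getD 3 0 < 10 ∧
     10 ≤ window.getD 0 0 ∧ 10 ≤ window.getD 4 0 then
    m.take (i+1) ++ List.replicate 3 (window.getD 0 0) ++ m.drop (i+4)
  else m

-- range(len(arr) - 5 + 1): Nat 'len + 1 - 5' equals the Int value clamped at 0, exact here.
def sliding_window_5 (arr : List Int) : List Int :=
  (List.range (arr.length + 1 - 5)).foldl (pvStepA arr) arr

-- ===== PORT B =====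
-- Python's 'i >= 0 and i + 4 < n' with i = j - d becomes 'd ≤ j ∧ j - d + 4 < n' on Nat.
def pvMatchB (arr : List Int) (j d : Nat) : Bool :=
  decide (d ≤ j) && decide (j - d + 4 < arr.length) &&
  decide (10 ≤ arr.getD (j - d) 0) && decide (10 ≤ arr.getD (j - d + 4) 0) &&
  decide (arr.getD (j - d + 1) 0 < 10) && decide (arr.getD (j - d + 2) 0 < 10) &&
  decide (arr.getD (j - d + 3) 0 < 10)

def pvValueAt (arr : List Int) (j : Nat) : Int :=
  if pvMatchB arr j 1 then arr.getD (j - 1) 0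
  else if pvMatchB arr j 2 then arr.getD (j - 2) 0
  else if pvMatchB arr j 3 then arr.getD (j - 3) 0
  else arr.getD j 0

def sliding_window_5_alt (arr : List Int) : List Int :=
  (List.range arr.length).map (pvValueAt arr)

-- ===== PRECONDITION & SPEC =====
def Spec_sliding_window_5 (arr : List Int) (out : List Int) : Prop := out = sliding_window_5_alt arr
instance (arr : List Int) (out : List Int) : Decidable (Spec_sliding_window_5 arr out) := by unfold Spec_sliding_window_5; infer_instance

-- ===== CLAIM (what is proved, stated in full; the proofs are below) =====
def Claim_equal_sliding_window_5 : Prop := ∀ (arr : List Int), Dom_sliding_window_5 arr → Spec_sliding_window_5 arr (sliding_window_5 arr)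

-- ===== LEMMAS AND PROOFS =====

-- the window condition of A, read on arr
abbrev pvCond (arr : List Int) (i : Nat) : Prop :=
  arr.getD (i+1) 0 < 10 ∧ arr.getD (i+2) 0 < 10 ∧ arr.getD (i+3) 0 < 10 ∧
  10 ≤ arr.getD i 0 ∧ 10 ≤ arr.getD (i+4) 0

lemma pv_getD_window (arr : List Int) (i k : Nat) (h : k < 5) :
    ((arr.drop i).take 5).getD k 0 = arr.getD (i + k) 0 := by
  simp [List.getD, h]

lemma pv_step_eq (arr m : List Int) (i : Nat) :
    pvStepA arr m i =
      if pvCond arr i then m.take (i+1) ++ List.replicate 3 (arr.getD i 0) ++ m.drop (i+4)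
      else m := by
  unfold pvStepA
  simp only [pv_getD_window arr i 0 (by omega), pv_getD_window arr i 1 (by omega),
    pv_getD_window arr i 2 (by omega), pv_getD_window arr i 3 (by omega),
    pv_getD_window arr i 4 (by omega)]
  unfold pvCond
  norm_num

lemma pv_splice_getD (m : List Int) (v : Int) (k : Nat) (hk : k + 4 ≤ m.length) (j : Nat) :
    (m.take (k+1) ++ List.replicate 3 v ++ m.drop (k+4)).getD j 0 =
      if k + 1 ≤ j ∧ j ≤ k + 3 then v else m.getD j 0 := by
  have hlen : (m.take (k+1)).length = k + 1 := by simp; omega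
  have hlen2 : (m.take (k+1) ++ List.replicate 3 v).length = k + 4 := by simp [hlen]
  by_cases h1 : j < k + 4
  · rw [List.getD, List.getElem?_append_left (by omega)]
    by_cases h2 : j < k + 1
    · rw [List.getElem?_append_left (by omega), List.getElem?_take]
      simp [h2, List.getD]
      omega
    · rw [List.getElem?_append_right (by omega), hlen, List.getElem?_replicate]
      have h3 : j - (k+1) < 3 := by omega
      simp [h3, List.getD]
      omega
  · rw [List.getD, List.getElem?_append_right (by omega), hlen2]
    simp only [List.getElem?_drop, List.getD]
    have e : k + 4 + (j - (k + 4)) = j := by omega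
    rw [e, if_neg (by omega : ¬ (k + 1 ≤ j ∧ j ≤ k + 3))]

-- matching windows are at least 4 apart
lemma pv_sep (arr : List Int) (i k : Nat) (hi : pvCond arr i) (hk : pvCond arr k)
    (hik : i < k) : i + 4 ≤ k := by
  by_contra h
  obtain ⟨hi1, hi2, hi3, hi0, hi4⟩ := hi
  obtain ⟨hk1, hk2, hk3, hk0, hk4⟩ := hk
  have hc : k = i + 1 ∨ k = i + 2 ∨ k = i + 3 := by omega
  rcases hc with h' | h' | h' <;> subst h'
  · rw [show i + 1 + 3 = i + 4 by omega] at hk3; omega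
  · rw [show i + 2 + 2 = i + 4 by omega] at hk2; omega
  · rw [show i + 3 + 1 = i + 4 by omega] at hk1; omega

lemma pv_inv (arr : List Int) (k : Nat) (hk : k ≤ arr.length - 4) :
    ((List.range k).foldl (pvStepA arr) arr).length = arr.length ∧
    ∀ j : Nat,
      ((∀ i, i < k → pvCond arr i → i + 1 ≤ j → j ≤ i + 3 → False) →
        ((List.range k).foldl (pvStepA arr) arr).getD j 0 = arr.getD j 0) ∧
      (∀ i, i < k → pvCond arr i → i + 1 ≤ j → j ≤ i + 3 →
        ((List.range k).foldl (pvStepA arr) arr).getD j 0 = arr.getD i 0) := by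
  induction k with
  | zero => simp
  | succ k ih =>
    have hk' : k ≤ arr.length - 4 := by omega
    obtain ⟨ihlen, ihpt⟩ := ih hk'
    have hstep : (List.range (k+1)).foldl (pvStepA arr) arr =
        pvStepA arr ((List.range k).foldl (pvStepA arr) arr) k := by
      rw [List.range_succ, List.foldl_append]; rfl
    rw [hstep, pv_step_eq]
    set m := (List.range k).foldl (pvStepA arr) arr with hm
    by_cases hc : pvCond arr k
    · rw [if_pos hc]
      have hklen : k + 4 ≤ m.length := by rw [ihlen]; omega
      constructor
      · simp only [List.length_append, List.length_take, List.length_replicate,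
          List.length_drop, ihlen]
        omega
      · intro j
        rw [pv_splice_getD m _ k hklen j]
        constructor
        · intro hnone
          have hnc : ¬ (k + 1 ≤ j ∧ j ≤ k + 3) := by
            intro hcj
            exact hnone k (by omega) hc hcj.1 hcj.2
          rw [if_neg hnc]
          exact (ihpt j).1 (fun i hi hci h1 h2 => hnone i (by omega) hci h1 h2)
        · intro i hi hci h1 h2
          by_cases hik : i = k
          · subst hik
            rw [if_pos ⟨h1, h2⟩]
          · have hik' : i < k := by omega
            have hsep := pv_sep arr i k hci hc hik'
            have hnc : ¬ (k + 1 ≤ j ∧ j ≤ k + 3) := by omega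
            rw [if_neg hnc]
            exact (ihpt j).2 i hik' hci h1 h2
    · rw [if_neg hc]
      refine ⟨ihlen, fun j => ⟨fun hnone => (ihpt j).1 (fun i hi => hnone i (by omega)),
        fun i hi hci h1 h2 => ?_⟩⟩
      have hik : i < k := by
        rcases Nat.lt_succ_iff_lt_or_eq.mp hi with h' | h'
        · exact h'
        · subst h'; exact absurd hci hc
      exact (ihpt j).2 i hik hci h1 h2

lemma pv_matchB_iff (arr : List Int) (j d : Nat) :
    pvMatchB arr j d = true ↔
      d ≤ j ∧ j - d + 4 < arr.length ∧ pvCond arr (j - d) := by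
  unfold pvMatchB pvCond
  simp only [Bool.and_eq_true, decide_eq_true_eq]
  tauto

-- ===== VERDICT (by name: the statement is the Claim_ definition above) =====
theorem sliding_window_5_spec : Claim_equal_sliding_window_5 := by
  intro arr _
  unfold Spec_sliding_window_5 sliding_window_5 sliding_window_5_alt
  rw [show arr.length + 1 - 5 = arr.length - 4 by omega]
  obtain ⟨hlen, hpt⟩ := pv_inv arr (arr.length - 4) (le_refl _)
  apply List.ext_getElem
  · simp [hlen]
  · intro j h1 h2
    have hj : j < arr.length := by simpa using h2
    rw [List.getElem_map, List.getElem_range]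
    have hgd : ((List.range (arr.length - 4)).foldl (pvStepA arr) arr)[j] =
        ((List.range (arr.length - 4)).foldl (pvStepA arr) arr).getD j 0 := by
      simp [List.getD, List.getElem?_eq_getElem h1]
    rw [hgd]
    unfold pvValueAt
    by_cases m1 : pvMatchB arr j 1
    · rw [if_pos m1]
      obtain ⟨hd, hr, hcnd⟩ := (pv_matchB_iff arr j 1).mp m1
      exact (hpt j).2 (j - 1) (by omega) hcnd (by omega) (by omega)
    · rw [if_neg m1]
      by_cases m2 : pvMatchB arr j 2
      · rw [if_pos m2]
        obtain ⟨hd, hr, hcnd⟩ := (pv_matchB_iff arr j 2).mp m2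
        exact (hpt j).2 (j - 2) (by omega) hcnd (by omega) (by omega)
      · rw [if_neg m2]
        by_cases m3 : pvMatchB arr j 3
        · rw [if_pos m3]
          obtain ⟨hd, hr, hcnd⟩ := (pv_matchB_iff arr j 3).mp m3
          exact (hpt j).2 (j - 3) (by omega) hcnd (by omega) (by omega)
        · rw [if_neg m3]
          refine (hpt j).1 (fun i hi hci hij1 hij2 => ?_)
          have hd : j - i = 1 ∨ j - i = 2 ∨ j - i = 3 := by omega
          have hie : ∀ d : Nat, j - i = d → pvMatchB arr j d = true := by
            intro d hde
            refine (pv_matchB_iff arr j d).mpr ⟨by omega, by omega, ?_⟩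
            rw [show j - d = i by omega]
            exact hci
          rcases hd with h' | h' | h'
          · exact m1 (hie 1 h')
          · exact m2 (hie 2 h')
          · exact m3 (hie 3 h')
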